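-- pv_equiv track=rewrite | github.com/19barsav/Project6_Teaching | project6.py | get_books_by_keyword
-- ===== SOURCE A (Python) =====
-- def get_books_by_keyword(master_list, keywords):
--     new_list = []
--     for book in master_list:
--         des = book[4].lower()
--         for word in keywords:
--             if word.lower() in des:
--                 new_list.append(book)
--                 break
--     return new_list
-- ===== SOURCE B (Python) =====
-- import re
--
-- def get_books_by_keyword(master_list, keywords):
--     # One compiled alternation replaces the hand-written inner keyword loop.
--     if not keywords:
--         return []
--     pattern = re.compile('|'.join(re.escape(k.lower()) for k in keywords))
--     return [book for book in master_list if pattern.search(book[4].lower())]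
-- ===== Notes on version B (the rewrite author's own statement) =====
-- stated objective: idiomatic
-- what changed: Replaces the per-book inner keyword loop with one precompiled regex alternation of escaped lowered keywords (empty keyword list short-circuits to []) and an order-preserving list-comprehension filter.
import Mathlib
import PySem

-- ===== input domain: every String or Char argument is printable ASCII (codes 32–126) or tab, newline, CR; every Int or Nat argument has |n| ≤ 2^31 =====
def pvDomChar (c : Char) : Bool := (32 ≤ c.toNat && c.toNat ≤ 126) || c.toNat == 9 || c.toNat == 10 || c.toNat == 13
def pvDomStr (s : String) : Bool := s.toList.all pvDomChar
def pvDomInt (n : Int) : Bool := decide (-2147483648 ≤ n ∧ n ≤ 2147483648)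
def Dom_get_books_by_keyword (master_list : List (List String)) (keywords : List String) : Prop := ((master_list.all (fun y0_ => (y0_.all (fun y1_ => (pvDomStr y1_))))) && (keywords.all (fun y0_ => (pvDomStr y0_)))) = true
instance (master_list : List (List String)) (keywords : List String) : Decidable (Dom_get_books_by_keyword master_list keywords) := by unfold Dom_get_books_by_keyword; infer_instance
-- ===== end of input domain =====

-- B replaces A's hand-written inner keyword loop by one precompiled regex alternation of the
-- escaped lowered keywords (empty keyword list returns [] directly); ported as an any-substring
-- match, which is exactly what that literal alternation matches.


-- ===== PORT A =====
-- inner 'for word in keywords: if word.lower() in des: append; break'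
def pvAInner (des : String) : List String → Bool
  | [] => false
  | w :: ws => if PySem.Str.isIn (PySem.Str.lower w) des then true else pvAInner des ws

def get_books_by_keyword (master_list : List (List String)) (keywords : List String) : List (List String) :=
  master_list.foldl (fun new_list book =>
    match PySem.List.pyGet? book 4 with
    | none => new_list    -- book[4] raises IndexError; excluded by Pre_
    | some d => if pvAInner (PySem.Str.lower d) keywords then new_list ++ [book] else new_list) []

-- ===== PORT B =====
def get_books_by_keyword_alt (master_list : List (List String)) (keywords : List String) : List (List String) :=
  if keywords.isEmpty then []
  else
    -- pattern = '|'.join(re.escape(k.lower()) ...): the alternation of the literal lowered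
    -- keywords; pattern.search(des) succeeds iff some lowered keyword is a substring of des.
    let pat := keywords.map PySem.Str.lower
    master_list.filter (fun book =>
      match PySem.List.pyGet? book 4 with
      | none => false
      | some d => pat.any (fun k => PySem.Str.isIn k (PySem.Str.lower d)))

-- ===== PRECONDITION & SPEC =====
-- Pre_ excludes inputs where some book has fewer than 5 fields: A raises IndexError on book[4].
def Pre_get_books_by_keyword (master_list : List (List String)) (keywords : List String) : Prop :=
  ∀ book ∈ master_list, 5 ≤ book.length
instance (master_list : List (List String)) (keywords : List String) : Decidable (Pre_get_books_by_keyword master_list keywords) := by unfold Pre_get_books_by_keyword; infer_instance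

def pvWitness_get_books_by_keyword : List (List String) × List String :=
  ([["t", "a", "y", "p", "a nice dog"], ["t", "a", "y", "p", "a cat"]], ["dog"])

def Spec_get_books_by_keyword (master_list : List (List String)) (keywords : List String) (out : List (List String)) : Prop := out = get_books_by_keyword_alt master_list keywords
instance (master_list : List (List String)) (keywords : List String) (out : List (List String)) : Decidable (Spec_get_books_by_keyword master_list keywords out) := by unfold Spec_get_books_by_keyword; infer_instance

-- ===== CLAIM (what is proved, stated in full; the proofs are below) =====
def Claim_equal_get_books_by_keyword : Prop := ∀ (master_list : List (List String)) (keywords : List String), Dom_get_books_by_keyword master_list keywords → Pre_get_books_by_keyword master_list keywords → Spec_get_books_by_keyword master_list keywords (get_books_by_keyword master_list keywords)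
-- ===== LEMMAS AND PROOFS =====

-- A's inner break-loop decides exactly 'some lowered keyword is a substring of des'.
theorem pvAInner_eq_any (des : String) (kws : List String) :
    pvAInner des kws = (kws.map PySem.Str.lower).any (fun k => PySem.Str.isIn k des) := by
  induction kws with
  | nil => rfl
  | cons w ws ih =>
    by_cases h : PySem.Str.isIn (PySem.Str.lower w) des = true <;>
      simp [pvAInner, ih, h]

theorem pvFoldl_filter (kws : List String) (ml : List (List String)) (acc : List (List String)) :
    ml.foldl (fun new_list book =>
      match PySem.List.pyGet? book 4 with
      | none => new_list
      | some d => if pvAInner (PySem.Str.lower d) kws then new_list ++ [book] else new_list) acc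
    = acc ++ ml.filter (fun book =>
        match PySem.List.pyGet? book 4 with
        | none => false
        | some d => (kws.map PySem.Str.lower).any (fun k => PySem.Str.isIn k (PySem.Str.lower d))) := by
  induction ml generalizing acc with
  | nil => simp
  | cons b bs ih =>
    rw [List.foldl_cons, List.filter_cons]
    cases h : PySem.List.pyGet? b 4 with
    | none => simp only [h, Bool.false_eq_true, if_false]; exact ih acc
    | some d =>
      simp only [h]
      rw [pvAInner_eq_any]
      split_ifs with hp
      · rw [ih]
        simp
      · exact ih acc

-- ===== VERDICT (by name: the statement is the Claim_ definition above) =====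
theorem get_books_by_keyword_spec : Claim_equal_get_books_by_keyword := by
  intro ml kws _ _
  unfold Spec_get_books_by_keyword get_books_by_keyword get_books_by_keyword_alt
  rw [pvFoldl_filter]
  cases kws with
  | nil =>
    simp only [List.isEmpty_nil, if_true, List.nil_append]
    rw [List.filter_eq_nil_iff.mpr]
    intro a _
    cases PySem.List.pyGet? a 4 <;> simp
  | cons k ks => simp
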